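-- pv_equiv track=rewrite | github.com/tysonwu/ngau-ngau | ngau_ngau_monte_carlo.py | best_arrangement
-- ===== SOURCE A (Python) =====
-- def get_numeric(cards):
--     tot = [int(c[-1]) if c[-1] not in ['J','Q','K'] else 0 for c in cards]
--     return sum(tot) % 10
--
-- def arrange(cards):
--     # look for formation of 0
--     result = []
--     for ipos, i in enumerate(cards):
--         for jpos, j in enumerate(cards):
--             if ipos == jpos:
--                 continue
--             n = cards[:]
--             if ipos < jpos:
--                 n.pop(jpos)
--                 n.pop(ipos)
--             if ipos > jpos:
--                 n.pop(ipos)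
--                 n.pop(jpos)
--             if get_numeric(n) == 0 or len(set([c[-1] for c in n])) == 1:
--                 result.append(n)
--     if result:
--         # to remove duplicates
--         arrangement_list = set(tuple(k) for k in result)
--         return [[arr,tuple(set(cards)-set(arr))] for arr in arrangement_list]
--     else:
--         return result
--
-- def best_arrangement(cards):
--     form = arrange(cards)
--     # game-enabled scenario
--     best_arr = None
--     # the below checks hand from smallest to greatest
--     if form:
--         digits = [get_numeric(f[-1]) for f in form]
--         best_arr = f'ngau-{max(digits)}' if all([d != 0 for d in digits]) else 'ngau-ngau'
--         # check for ngau-pair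
--         for f in form:
--             top = f[-1] # tuple of two cards
--             if top[0][-1] == top[1][-1]:
--                 best_arr = 'ngau-pair'
--                 break
--     # not game-enabled scenario
--     else:
--         pass
--
--     # all-big and all-small
--     cards_numeric = [str(c[-1]) for c in cards]
--     all_big = ['0','J','Q','K']
--     all_small = ['1','2','3','4']
--     if all([n in all_small for n in cards_numeric]):
--         best_arr = 'all-small'
--     if all([n in all_big for n in cards_numeric]):
--         best_arr = 'all-big'
--     if best_arr is None:
--         best_arr = 'no-game'
--     return best_arr
-- ===== SOURCE B (Python) =====
-- def best_arrangement(cards):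
--     # One-pass fold over the dropped index pairs i<j: no intermediate result/form
--     # lists, no set-dedup and no set differences; the kept group's numeric is
--     # obtained in closed form as (total - vals[i] - vals[j]) % 10.
--     ranks = [c[-1] for c in cards]
--     m = len(cards)
--     best = None
--     if m >= 2:
--         vals = [0 if r in ('J', 'Q', 'K') else int(r) for r in ranks]
--         total = sum(vals)
--         playable = False
--         max_d = -1
--         zero_d = False
--         pair = False
--         for i in range(m):
--             for j in range(i + 1, m):
--                 kept = ranks[:i] + ranks[i + 1:j] + ranks[j + 1:]
--                 if (total - vals[i] - vals[j]) % 10 == 0 or len(set(kept)) == 1: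
--                     d = (vals[i] + vals[j]) % 10
--                     playable = True
--                     max_d = max(max_d, d)
--                     zero_d = zero_d or d == 0
--                     pair = pair or ranks[i] == ranks[j]
--         if playable:
--             best = 'ngau-pair' if pair else ('ngau-ngau' if zero_d else f'ngau-{max_d}')
--     if all(r in ('1', '2', '3', '4') for r in ranks):
--         best = 'all-small'
--     if all(r in ('0', 'J', 'Q', 'K') for r in ranks):
--         best = 'all-big'
--     return best if best is not None else 'no-game'
-- ===== Notes on version B (the rewrite author's own statement) =====
-- stated objective: alternative
-- what changed: A materialises every kept group via pop-copies over ordered index pairs, dedups them through a set, recovers the dropped pair by set difference and then walks the resulting form list three times (digits map, all(), pair loop); B is a single fold over the unordered index pairs i<j that maintains the four aggregates (playability, max digit, zero-digit flag, dropped-pair flag) directly, computing each kept group's numeric in closed form as (total - vals[i] - vals[j]) % 10, with no result/form lists, no set-dedup and no set differences.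
-- outside the precondition, e.g. on best_arrangement(['S1', 'S1', 'H2', 'D3', 'C4']): A returns 'all-small', B returns 'all-small'; on best_arrangement(['S5', 'S5', 'H2', 'D3']): A returns 'ngau-5', B returns 'ngau-5'
import Mathlib
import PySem

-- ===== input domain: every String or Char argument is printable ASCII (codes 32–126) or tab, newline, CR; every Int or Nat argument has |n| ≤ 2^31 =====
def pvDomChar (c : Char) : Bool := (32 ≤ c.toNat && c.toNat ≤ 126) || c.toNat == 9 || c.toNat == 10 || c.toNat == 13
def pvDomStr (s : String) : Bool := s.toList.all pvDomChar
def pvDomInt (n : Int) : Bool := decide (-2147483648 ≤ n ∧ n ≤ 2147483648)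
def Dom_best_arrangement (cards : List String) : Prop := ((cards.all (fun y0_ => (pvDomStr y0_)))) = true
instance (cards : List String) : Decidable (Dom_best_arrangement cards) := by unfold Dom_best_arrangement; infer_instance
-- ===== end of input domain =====

-- B replaces A's drop-pair double loop + set-dedup + set-difference bookkeeping by a
-- single fold over index pairs i<j that maintains the four aggregates directly,
-- with the kept group's numeric obtained in closed form from the total.

-- ===== PORT A =====
-- c[-1]: Python raises IndexError on ""; the ' ' default is unreachable under Pre_
def pvLast (c : String) : Char := (PySem.Str.pyGet? c (-1)).getD ' '

def get_numeric (cards : List String) : Int :=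
  let tot := cards.map (fun c =>
    if pvLast c ∉ (['J', 'Q', 'K'] : List Char) then (PySem.Int.ofChars? [pvLast c]).getD 0 else 0)
  PySem.Int.mod tot.sum 10

-- the `result` accumulator of A's arrange (n.pop(k) at an in-range index; the .getD
-- fallback is unreachable since enumerate indices are in range)
def arrangeResult (cards : List String) : List (List String) :=
  (PySem.List.enumerate cards).foldl (fun result ip =>
    (PySem.List.enumerate cards).foldl (fun result jp =>
      if ip.1 == jp.1 then result
      else
        let n :=
          if ip.1 < jp.1 then
            let n1 := ((PySem.List.pop? cards jp.1).map Prod.snd).getD cards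
            ((PySem.List.pop? n1 ip.1).map Prod.snd).getD n1
          else if jp.1 < ip.1 then
            let n1 := ((PySem.List.pop? cards ip.1).map Prod.snd).getD cards
            ((PySem.List.pop? n1 jp.1).map Prod.snd).getD n1
          else cards
        if get_numeric n == 0 || (PySem.Set.ofList (n.map pvLast)).length == 1
        then result ++ [n] else result) result) []

-- A's arrange; [arr, tuple(...)] becomes a pair; the Python `else` branch returns
-- `result`, which is [] there, so the port returns [] of the pair type
def arrange (cards : List String) : List (List String × List String) :=
  let result := arrangeResult cards
  if result ≠ [] then
    (PySem.Set.ofList result).map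
      (fun arr => (arr, PySem.Set.diff (PySem.Set.ofList cards) (PySem.Set.ofList arr)))
  else []

-- top[0][-1] == top[1][-1] (IndexError on short tuples → defaults, unreachable under Pre_)
def pvPairRankEq (f : List String × List String) : Bool :=
  pvLast (PySem.List.pyGetD f.2 0 "") == pvLast (PySem.List.pyGetD f.2 1 "")

-- A's `for f in form: ... break` loop
def pvCheckPair : List (List String × List String) → String → String
  | [], best => best
  | f :: rest, best => if pvPairRankEq f then "ngau-pair" else pvCheckPair rest best

def best_arrangement (cards : List String) : String :=
  let form := arrange cards
  let best_arr : Option String :=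
    if form ≠ [] then
      let digits := form.map (fun f => get_numeric f.2)
      let b0 := if digits.all (fun d => d != 0)
                then "ngau-" ++ PySem.Int.toStr ((PySem.List.max? digits (fun x => x)).getD 0)
                else "ngau-ngau"
      some (pvCheckPair form b0)
    else none
  let cards_numeric := cards.map (fun c => pvLast c)
  let all_big : List Char := ['0', 'J', 'Q', 'K']
  let all_small : List Char := ['1', '2', '3', '4']
  let best_arr := if cards_numeric.all (fun n => n ∈ all_small) then some "all-small" else best_arr
  let best_arr := if cards_numeric.all (fun n => n ∈ all_big) then some "all-big" else best_arr
  best_arr.getD "no-game"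

-- ===== PORT B =====
-- B's value of a rank character (int(r) ValueError → 0 default, unreachable under Pre_)
def pvValB (r : Char) : Int :=
  if r ∈ (['J', 'Q', 'K'] : List Char) then 0 else (PySem.Int.ofChars? [r]).getD 0

def best_arrangement_alt (cards : List String) : String :=
  let ranks := cards.map (fun c => pvLast c)
  let m : Int := PySem.List.len cards
  let best : Option String :=
    if 2 ≤ m then
      let vals := ranks.map pvValB
      let total := vals.sum
      let st :=
        (PySem.List.pyRange 0 m 1).foldl (fun st i =>
          (PySem.List.pyRange (i + 1) m 1).foldl (fun st j =>
            let kept := PySem.List.slice ranks none (some i)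
                      ++ PySem.List.slice ranks (some (i + 1)) (some j)
                      ++ PySem.List.slice ranks (some (j + 1)) none
            if PySem.Int.mod (total - PySem.List.pyGetD vals i 0 - PySem.List.pyGetD vals j 0) 10 == 0
               || (PySem.Set.ofList kept).length == 1 then
              let d := PySem.Int.mod (PySem.List.pyGetD vals i 0 + PySem.List.pyGetD vals j 0) 10
              (true, max st.2.1 d, st.2.2.1 || (d == 0),
               st.2.2.2 || (PySem.List.pyGetD ranks i ' ' == PySem.List.pyGetD ranks j ' '))
            else st) st)
          ((false, -1, false, false) : Bool × Int × Bool × Bool)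
      if st.1 then
        some (if st.2.2.2 then "ngau-pair"
              else if st.2.2.1 then "ngau-ngau"
              else "ngau-" ++ PySem.Int.toStr st.2.1)
      else none
    else none
  let best := if ranks.all (fun r => r ∈ (['1', '2', '3', '4'] : List Char)) then some "all-small" else best
  let best := if ranks.all (fun r => r ∈ (['0', 'J', 'Q', 'K'] : List Char)) then some "all-big" else best
  best.getD "no-game"

-- ===== PRECONDITION & SPEC =====
def pvValidCard (c : String) : Bool :=
  match c.toList.getLast? with
  | none => false
  | some ch => ch ∈ (['0','1','2','3','4','5','6','7','8','9','J','Q','K'] : List Char)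

-- Pre_ excludes (a) hands with two or more cards on which some card is empty or has a
-- non-rank last character (there A raises ValueError/IndexError, as does B), and
-- (b) hands with duplicate cards, on which A's set-difference bookkeeping raises
-- IndexError for many hands (whenever a kept group drops a repeated card) and pairs
-- kept groups with an accidental set remainder rather than the dropped pair.
def Pre_best_arrangement (cards : List String) : Prop :=
  cards.Nodup ∧ (∀ c ∈ cards, c.toList ≠ []) ∧
    (2 ≤ cards.length → ∀ c ∈ cards, pvValidCard c = true)
instance (cards : List String) : Decidable (Pre_best_arrangement cards) := by
  unfold Pre_best_arrangement; infer_instance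

def pvWitness_best_arrangement : List String := ["S1", "H2", "D3", "C4", "SJ"]

def Spec_best_arrangement (cards : List String) (out : String) : Prop := out = best_arrangement_alt cards
instance (cards : List String) (out : String) : Decidable (Spec_best_arrangement cards out) := by
  unfold Spec_best_arrangement; infer_instance

-- ===== CLAIM (what is proved, stated in full; the proofs are below) =====
def Claim_equal_best_arrangement : Prop := ∀ (cards : List String), Dom_best_arrangement cards → Pre_best_arrangement cards → Spec_best_arrangement cards (best_arrangement cards)

-- ===== LEMMAS AND PROOFS =====

-- proof-side abbreviations
def pvVal (c : String) : Int := pvValB (pvLast c)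

def keepL (l : List String) (a b : Nat) : List String := (l.eraseIdx b).eraseIdx a

def condP (l : List String) (a b : Nat) : Bool :=
  get_numeric (keepL l a b) == 0 || (PySem.Set.ofList ((keepL l a b).map pvLast)).length == 1

def dPair (l : List String) (a b : Nat) : Int :=
  PySem.Int.mod (pvVal (l.getD a "") + pvVal (l.getD b "")) 10

def prPair (l : List String) (a b : Nat) : Bool :=
  pvLast (l.getD a "") == pvLast (l.getD b "")

def HasPair (l : List String) : Prop := ∃ a b : Nat, a < b ∧ b < l.length ∧ condP l a b = true

lemma pvVal_eq (c : String) :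
    (if pvLast c ∉ (['J','Q','K'] : List Char) then (PySem.Int.ofChars? [pvLast c]).getD 0 else 0)
      = pvVal c := by
  unfold pvVal pvValB
  by_cases h : pvLast c ∈ (['J','Q','K'] : List Char) <;> simp [h]

lemma gn_eq (l : List String) : get_numeric l = PySem.Int.mod ((l.map pvVal).sum) 10 := by
  simp only [get_numeric, pvVal_eq]

lemma gn_pair (x y : String) : get_numeric [x, y] = PySem.Int.mod (pvVal x + pvVal y) 10 := by
  rw [gn_eq]
  congr 1
  simp [List.sum_cons]

lemma erase_two (A M C : List String) (x y : String) (na nb : Nat)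
    (hna : na = A.length) (hnb : nb = A.length + 1 + M.length) :
    keepL (A ++ x :: (M ++ y :: C)) na nb = A ++ (M ++ C) := by
  unfold keepL
  have h1 : A ++ x :: (M ++ y :: C) = (A ++ x :: M) ++ y :: C := by simp
  have h2 : nb = (A ++ x :: M).length := by simp [hnb]; omega
  rw [h1, h2, List.eraseIdx_append_of_length_le (le_refl _), Nat.sub_self]
  simp only [List.eraseIdx_cons_zero]
  have h3 : (A ++ x :: M) ++ C = A ++ x :: (M ++ C) := by simp
  rw [h3, hna, List.eraseIdx_append_of_length_le (le_refl _), Nat.sub_self]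
  simp

lemma keepL_split (l : List String) (a b : Nat) (hab : a < b) (hb : b < l.length) :
    ∃ A M C, l = A ++ (l.getD a "") :: (M ++ (l.getD b "") :: C)
      ∧ keepL l a b = A ++ (M ++ C) ∧ A = l.take a
      ∧ M = (l.drop (a+1)).take (b - (a+1)) ∧ C = l.drop (b+1) := by
  have ha : a < l.length := lt_trans hab hb
  have h1 : l.drop a = l.getD a "" :: l.drop (a+1) := by
    rw [List.getD_eq_getElem l "" ha]; exact List.drop_eq_getElem_cons ha
  have h2 : l.drop b = l.getD b "" :: l.drop (b+1) := by
    rw [List.getD_eq_getElem l "" hb]; exact List.drop_eq_getElem_cons hb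
  have h3 : l.drop (a+1) = (l.drop (a+1)).take (b - (a+1)) ++ (l.getD b "" :: l.drop (b+1)) := by
    conv_lhs => rw [← List.take_append_drop (b - (a+1)) (l.drop (a+1))]
    congr 1
    rw [List.drop_drop]
    have h4 : a + 1 + (b - (a+1)) = b := by omega
    rw [h4]
    exact h2
  refine ⟨l.take a, (l.drop (a+1)).take (b - (a+1)), l.drop (b+1), ?_, ?_, ?_⟩
  · conv_lhs => rw [← List.take_append_drop a l, h1, h3]
  · have hl : l = l.take a ++ (l.getD a "") :: ((l.drop (a+1)).take (b - (a+1)) ++ (l.getD b "") :: l.drop (b+1)) := by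
      conv_lhs => rw [← List.take_append_drop a l, h1, h3]
    conv_lhs => rw [hl]
    refine erase_two _ _ _ _ _ _ _ ?_ ?_
    · simp; omega
    · have h5 : (l.drop (a+1)).length = l.length - (a+1) := by simp
      simp [List.length_take, h5]; omega
  · exact ⟨rfl, rfl, rfl⟩

lemma sum_val_keepL (l : List String) (a b : Nat) (hab : a < b) (hb : b < l.length) :
    ((keepL l a b).map pvVal).sum
      = (l.map pvVal).sum - pvVal (l.getD a "") - pvVal (l.getD b "") := by
  obtain ⟨A, M, C, hl, hk, -⟩ := keepL_split l a b hab hb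
  set ca := l.getD a "" with hca
  set cb := l.getD b "" with hcb
  rw [hk]
  conv_rhs => rw [hl]
  simp [List.sum_append]
  ring

lemma map_val_keepL (l : List String) (a b : Nat) (hab : a < b) (hb : b < l.length) :
    (keepL l a b).map pvLast
      = (l.map pvLast).take a ++ (((l.map pvLast).drop (a+1)).take (b - (a+1))
          ++ (l.map pvLast).drop (b+1)) := by
  obtain ⟨A, M, C, -, hk, hA, hM, hC⟩ := keepL_split l a b hab hb
  rw [hk, hA, hM, hC]
  simp [List.map_take, List.map_drop]

lemma diff_keepL (l : List String) (a b : Nat) (hnd : l.Nodup) (hab : a < b) (hb : b < l.length) :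
    PySem.Set.diff (PySem.Set.ofList l) (PySem.Set.ofList (keepL l a b))
      = [l.getD a "", l.getD b ""] := by
  obtain ⟨A, M, C, hl, hk, -⟩ := keepL_split l a b hab hb
  set ca := l.getD a "" with hca
  set cb := l.getD b "" with hcb
  have hofl : PySem.Set.ofList l = l := PySem.Set.ofList_eq_self_of_nodup l hnd
  have hdiff : PySem.Set.diff (PySem.Set.ofList l) (PySem.Set.ofList (keepL l a b))
      = l.filter (fun x => !(PySem.Set.contains (PySem.Set.ofList (keepL l a b)) x)) := by
    rw [hofl]; rfl
  rw [hdiff]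
  have hpt : ∀ x : String, (!(PySem.Set.contains (PySem.Set.ofList (keepL l a b)) x))
      = decide (x ∉ A ++ (M ++ C)) := by
    intro x
    rw [hk]
    by_cases hx : x ∈ A ++ (M ++ C)
    · have hc : PySem.Set.contains (PySem.Set.ofList (A ++ (M ++ C))) x = true := by
        rw [PySem.Set.contains_iff, PySem.Set.mem_ofList]; exact hx
      simp [hx]
    · have hc : PySem.Set.contains (PySem.Set.ofList (A ++ (M ++ C))) x = false := by
        rw [Bool.eq_false_iff]
        intro hc
        rw [PySem.Set.contains_iff, PySem.Set.mem_ofList] at hc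
        exact hx hc
      simp [hx]
  rw [List.filter_congr (fun x _ => hpt x)]
  have hnd' : (A ++ ca :: (M ++ cb :: C)).Nodup := hl ▸ hnd
  simp only [List.nodup_append, List.nodup_cons] at hnd'
  conv_lhs => rw [hl]
  rw [List.filter_append, List.filter_cons, List.filter_append, List.filter_cons]
  have hAnil : A.filter (fun x => decide (x ∉ A ++ (M ++ C))) = [] := by
    rw [List.filter_eq_nil_iff]
    intro x hx
    simp only [decide_not, Bool.not_eq_true', decide_eq_false_iff_not, not_not]
    exact List.mem_append_left _ hx
  have hMnil : M.filter (fun x => decide (x ∉ A ++ (M ++ C))) = [] := by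
    rw [List.filter_eq_nil_iff]
    intro x hx
    simp only [decide_not, Bool.not_eq_true', decide_eq_false_iff_not, not_not]
    exact List.mem_append_right _ (List.mem_append_left _ hx)
  have hCnil : C.filter (fun x => decide (x ∉ A ++ (M ++ C))) = [] := by
    rw [List.filter_eq_nil_iff]
    intro x hx
    simp only [decide_not, Bool.not_eq_true', decide_eq_false_iff_not, not_not]
    exact List.mem_append_right _ (List.mem_append_right _ hx)
  obtain ⟨-, ⟨hcaM, -, ⟨hcbC, -⟩, hMdisj⟩, hAdisj⟩ := hnd'
  have hca' : ca ∉ A ++ (M ++ C) := by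
    intro hmem
    rw [List.mem_append, List.mem_append] at hmem
    rcases hmem with h | h | h
    · exact hAdisj ca h ca (List.mem_cons_self ..) rfl
    · exact hcaM (List.mem_append_left _ h)
    · exact hcaM (List.mem_append_right _ (List.mem_cons_of_mem _ h))
  have hcb' : cb ∉ A ++ (M ++ C) := by
    intro hmem
    rw [List.mem_append, List.mem_append] at hmem
    rcases hmem with h | h | h
    · exact hAdisj cb h cb (by simp) rfl
    · exact hMdisj cb h cb (List.mem_cons_self ..) rfl
    · exact hcbC h
  have hcaT : (decide (ca ∉ A ++ (M ++ C)) : Bool) = true := by simpa using hca'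
  have hcbT : (decide (cb ∉ A ++ (M ++ C)) : Bool) = true := by simpa using hcb'
  rw [hAnil, hMnil, hCnil, hcaT, hcbT]
  simp

-- the kept list A's inner loop builds for the ordered index pair (ip, jp)
def keepE (l : List String) (ip jp : Int × String) : List String :=
  if ip.1 < jp.1 then
    let n1 := ((PySem.List.pop? l jp.1).map Prod.snd).getD l
    ((PySem.List.pop? n1 ip.1).map Prod.snd).getD n1
  else if jp.1 < ip.1 then
    let n1 := ((PySem.List.pop? l ip.1).map Prod.snd).getD l
    ((PySem.List.pop? n1 jp.1).map Prod.snd).getD n1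
  else l

def condE (l : List String) (ip jp : Int × String) : Bool :=
  get_numeric (keepE l ip jp) == 0 || (PySem.Set.ofList ((keepE l ip jp).map pvLast)).length == 1

lemma arrangeResult_eq (l : List String) :
    arrangeResult l = (PySem.List.enumerate l).flatMap (fun ip =>
      ((PySem.List.enumerate l).filter (fun jp => !(ip.1 == jp.1) && condE l ip jp)).map
        (keepE l ip)) := by
  unfold arrangeResult
  have hinner : ∀ (ip : Int × String) (res : List (List String)),
      (PySem.List.enumerate l).foldl (fun result jp =>
        if ip.1 == jp.1 then result
        else
          let n :=
            if ip.1 < jp.1 then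
              let n1 := ((PySem.List.pop? l jp.1).map Prod.snd).getD l
              ((PySem.List.pop? n1 ip.1).map Prod.snd).getD n1
            else if jp.1 < ip.1 then
              let n1 := ((PySem.List.pop? l ip.1).map Prod.snd).getD l
              ((PySem.List.pop? n1 jp.1).map Prod.snd).getD n1
            else l
          if get_numeric n == 0 || (PySem.Set.ofList (n.map pvLast)).length == 1
          then result ++ [n] else result) res
      = res ++ ((PySem.List.enumerate l).filter (fun jp => !(ip.1 == jp.1) && condE l ip jp)).map
          (keepE l ip) := by
    intro ip res
    rw [PySem.List.foldl_congr_mem _ _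
      (fun result jp => if (!(ip.1 == jp.1) && condE l ip jp) = true
        then result ++ [keepE l ip jp] else result) res ?_]
    · exact PySem.List.foldl_append_if _ _ _ _
    · intro acc jp _
      cases h : (ip.1 == jp.1) <;>
        simp only [condE, keepE, h, Bool.not_true, Bool.not_false, Bool.false_and,
          Bool.true_and, if_true, if_false, Bool.false_eq_true]
  rw [PySem.List.foldl_congr_mem _ _
    (fun res ip => res ++ ((PySem.List.enumerate l).filter
      (fun jp => !(ip.1 == jp.1) && condE l ip jp)).map (keepE l ip)) []
    (fun acc ip _ => hinner ip acc)]
  rw [PySem.List.foldl_append_eq_flatMap]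
  simp

lemma keepE_lt (l : List String) (k j : Nat) (x y : String) (hkj : k < j) (hj : j < l.length) :
    keepE l ((k : Int), x) ((j : Int), y) = keepL l k j := by
  unfold keepE keepL
  have hlt : ((k : Int), x).1 < ((j : Int), y).1 := by show (k:Int) < (j:Int); exact_mod_cast hkj
  rw [if_pos hlt]
  rw [PySem.List.pop?_natCast l j hj]
  have hk' : k < (l.eraseIdx j).length := by
    rw [List.length_eraseIdx_of_lt hj]; omega
  simp only [Option.map_some, Option.getD_some]
  rw [PySem.List.pop?_natCast _ k hk']
  simp

lemma keepE_gt (l : List String) (k j : Nat) (x y : String) (hjk : j < k) (hk : k < l.length) :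
    keepE l ((k : Int), x) ((j : Int), y) = keepL l j k := by
  unfold keepE keepL
  have h1 : ¬(((k : Int), x).1 < ((j : Int), y).1 : Prop) := by simp; exact_mod_cast Nat.le_of_lt hjk
  have h2 : (((j : Int), y).1 < ((k : Int), x).1 : Prop) := by show (j:Int) < (k:Int); exact_mod_cast hjk
  rw [if_neg h1, if_pos h2]
  rw [PySem.List.pop?_natCast l k hk]
  have hj' : j < (l.eraseIdx k).length := by
    rw [List.length_eraseIdx_of_lt hk]; omega
  simp only [Option.map_some, Option.getD_some]
  rw [PySem.List.pop?_natCast _ j hj']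
  simp

lemma condE_of_keepE (l : List String) (ip jp : Int × String) (a b : Nat)
    (h : keepE l ip jp = keepL l a b) : condE l ip jp = condP l a b := by
  unfold condE condP
  rw [h]

lemma mem_arrangeResult (l : List String) (x : List String) :
    x ∈ arrangeResult l
      ↔ ∃ a b : Nat, a < b ∧ b < l.length ∧ condP l a b = true ∧ x = keepL l a b := by
  rw [arrangeResult_eq]
  simp only [List.mem_flatMap, List.mem_map, List.mem_filter,
    PySem.List.mem_enumerate_iff]
  constructor
  · rintro ⟨ip, ⟨k, hk, rfl⟩, jp, ⟨⟨j, hj, rfl⟩, hcond⟩, rfl⟩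
    simp only [Bool.and_eq_true, Bool.not_eq_true'] at hcond
    obtain ⟨hne, hcE⟩ := hcond
    have hkj : k ≠ j := by
      intro h; apply absurd hne; simp [h]
    rcases Nat.lt_or_ge k j with hlt | hge
    · have hE := keepE_lt l k j l[k] l[j] hlt hj
      refine ⟨k, j, hlt, hj, ?_, ?_⟩
      · rw [← condE_of_keepE l _ _ k j (by simpa using hE)]
        simpa using hcE
      · simpa using hE
    · have hlt' : j < k := by omega
      have hE := keepE_gt l k j l[k] l[j] hlt' hk
      refine ⟨j, k, hlt', hk, ?_, ?_⟩
      · rw [← condE_of_keepE l _ _ j k (by simpa using hE)]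
        simpa using hcE
      · simpa using hE
  · rintro ⟨a, b, hab, hb, hcond, rfl⟩
    have ha : a < l.length := lt_trans hab hb
    refine ⟨((a : Int), l[a]), ⟨a, ha, by simp⟩,
            ((b : Int), l[b]), ⟨⟨b, hb, by simp⟩, ?_⟩, ?_⟩
    · have hE := keepE_lt l a b l[a] l[b] hab hb
      simp only [Bool.and_eq_true, Bool.not_eq_true']
      constructor
      · simp; omega
      · rw [condE_of_keepE l _ _ a b hE]; exact hcond
    · exact keepE_lt l a b l[a] l[b] hab hb

lemma arrange_mem (l : List String) (hnd : l.Nodup) (f : List String × List String) :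
    f ∈ arrange l ↔ ∃ a b : Nat, a < b ∧ b < l.length ∧ condP l a b = true
      ∧ f = (keepL l a b, [l.getD a "", l.getD b ""]) := by
  unfold arrange
  by_cases hres : arrangeResult l = []
  · simp only [hres, ne_eq, not_true_eq_false, if_false]
    simp only [List.not_mem_nil, false_iff]
    rintro ⟨a, b, hab, hb, hcond, -⟩
    have : keepL l a b ∈ arrangeResult l := by
      rw [mem_arrangeResult]; exact ⟨a, b, hab, hb, hcond, rfl⟩
    simp [hres] at this
  · simp only [hres, ne_eq, not_false_eq_true, if_true, List.mem_map]
    constructor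
    · rintro ⟨arr, harr, rfl⟩
      rw [PySem.Set.mem_ofList, mem_arrangeResult] at harr
      obtain ⟨a, b, hab, hb, hcond, rfl⟩ := harr
      exact ⟨a, b, hab, hb, hcond, by rw [diff_keepL l a b hnd hab hb]⟩
    · rintro ⟨a, b, hab, hb, hcond, rfl⟩
      refine ⟨keepL l a b, ?_, by rw [diff_keepL l a b hnd hab hb]⟩
      rw [PySem.Set.mem_ofList, mem_arrangeResult]
      exact ⟨a, b, hab, hb, hcond, rfl⟩

lemma arrange_eq_nil_iff (l : List String) : arrange l = [] ↔ ¬ HasPair l := by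
  unfold arrange HasPair
  by_cases hres : arrangeResult l = []
  · simp only [hres, ne_eq, not_true_eq_false, if_false, true_iff]
    rintro ⟨a, b, hab, hb, hcond⟩
    have : keepL l a b ∈ arrangeResult l := by
      rw [mem_arrangeResult]; exact ⟨a, b, hab, hb, hcond, rfl⟩
    simp [hres] at this
  · simp only [hres, ne_eq, not_false_eq_true, if_true]
    constructor
    · intro hmap
      rw [List.map_eq_nil_iff] at hmap
      obtain ⟨x, hx⟩ := List.exists_mem_of_ne_nil _ hres
      have : x ∈ PySem.Set.ofList (arrangeResult l) := by
        rw [PySem.Set.mem_ofList]; exact hx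
      simp [hmap] at this
    · intro hno
      exfalso
      obtain ⟨x, hx⟩ := List.exists_mem_of_ne_nil _ hres
      rw [mem_arrangeResult] at hx
      obtain ⟨a, b, hab, hb, hcond, -⟩ := hx
      exact hno ⟨a, b, hab, hb, hcond⟩

lemma checkPair_eq (form : List (List String × List String)) (b : String) :
    pvCheckPair form b = if form.any pvPairRankEq then "ngau-pair" else b := by
  induction form with
  | nil => simp [pvCheckPair]
  | cons f t ih =>
    by_cases h : pvPairRankEq f = true
    · simp [pvCheckPair, h]
    · rw [show pvCheckPair (f :: t) b = pvCheckPair t b from by simp [pvCheckPair, h], ih]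
      rw [List.any_cons, Bool.eq_false_iff.mpr h, Bool.false_or]

-- B-side proof objects
def pvValsOf (l : List String) : List Int := (l.map (fun c => pvLast c)).map pvValB

def dB (l : List String) (p : Int × Int) : Int :=
  PySem.Int.mod (PySem.List.pyGetD (pvValsOf l) p.1 0 + PySem.List.pyGetD (pvValsOf l) p.2 0) 10

def prB (l : List String) (p : Int × Int) : Bool :=
  PySem.List.pyGetD (l.map (fun c => pvLast c)) p.1 ' ' == PySem.List.pyGetD (l.map (fun c => pvLast c)) p.2 ' '

def keptB (l : List String) (p : Int × Int) : List Char :=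
  PySem.List.slice (l.map (fun c => pvLast c)) none (some p.1)
    ++ PySem.List.slice (l.map (fun c => pvLast c)) (some (p.1 + 1)) (some p.2)
    ++ PySem.List.slice (l.map (fun c => pvLast c)) (some (p.2 + 1)) none

def condB (l : List String) (p : Int × Int) : Bool :=
  PySem.Int.mod ((pvValsOf l).sum - PySem.List.pyGetD (pvValsOf l) p.1 0
      - PySem.List.pyGetD (pvValsOf l) p.2 0) 10 == 0
    || (PySem.Set.ofList (keptB l p)).length == 1

def updB (l : List String) (st : Bool × Int × Bool × Bool) (p : Int × Int) : Bool × Int × Bool × Bool :=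
  (true, max st.2.1 (dB l p), st.2.2.1 || (dB l p == 0), st.2.2.2 || prB l p)

def pairsOf (m : Int) : List (Int × Int) :=
  (PySem.List.pyRange 0 m 1).flatMap (fun i => (PySem.List.pyRange (i + 1) m 1).map (fun j => (i, j)))

lemma foldl_foldl_pairs {γ : Type} (l : List Int) (g : Int → List Int) (h : γ → Int → Int → γ)
    (init : γ) :
    l.foldl (fun st i => (g i).foldl (fun st j => h st i j) st) init
      = (l.flatMap (fun i => (g i).map (fun j => (i, j)))).foldl (fun st p => h st p.1 p.2) init := by
  induction l generalizing init with
  | nil => simp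
  | cons a t ih => simp [List.foldl_append, List.foldl_map, ih]

lemma mem_pairsOf (m : Int) (p : Int × Int) :
    p ∈ pairsOf m ↔ ∃ a b : Nat, a < b ∧ (b : Int) < m ∧ p = ((a : Int), (b : Int)) := by
  unfold pairsOf
  simp only [List.mem_flatMap, List.mem_map, PySem.List.mem_pyRange_one]
  constructor
  · rintro ⟨i, ⟨h0, -⟩, j, ⟨hij, hjm⟩, rfl⟩
    refine ⟨i.toNat, j.toNat, by omega, by omega, ?_⟩
    have h1 : ((i.toNat : Int)) = i := by omega
    have h2 : ((j.toNat : Int)) = j := by omega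
    rw [h1, h2]
  · rintro ⟨a, b, hab, hbm, rfl⟩
    exact ⟨(a : Int), ⟨by positivity, by omega⟩, (b : Int), ⟨by omega, hbm⟩, rfl⟩

lemma foldB_char (l : List String) (G : List (Int × Int)) (st0 : Bool × Int × Bool × Bool) :
    (G.foldl (updB l) st0).1 = (st0.1 || !G.isEmpty)
    ∧ (G.foldl (updB l) st0).2.2.1 = (st0.2.2.1 || G.any (fun p => dB l p == 0))
    ∧ (G.foldl (updB l) st0).2.2.2 = (st0.2.2.2 || G.any (prB l))
    ∧ (G.foldl (updB l) st0).2.1 = (G.map (dB l)).foldl max st0.2.1 := by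
  induction G generalizing st0 with
  | nil => simp
  | cons p t ih =>
    obtain ⟨ih1, ih2, ih3, ih4⟩ := ih (updB l st0 p)
    simp only [List.foldl_cons]
    refine ⟨?_, ?_, ?_, ?_⟩
    · rw [ih1]; simp [updB]
    · rw [ih2]; simp [updB, Bool.or_assoc]
    · rw [ih3]; simp [updB, Bool.or_assoc]
    · rw [ih4]; simp [updB]

lemma getD_vals (l : List String) (a : Nat) (ha : a < l.length) :
    PySem.List.pyGetD (pvValsOf l) (a : Int) 0 = pvVal (l.getD a "") := by
  rw [PySem.List.pyGetD_natCast]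
  unfold pvValsOf
  rw [List.map_map]
  rw [List.getD_eq_getElem _ _ (by simpa using ha), List.getD_eq_getElem _ _ ha]
  simp [pvVal]

lemma getD_ranks (l : List String) (a : Nat) (ha : a < l.length) :
    PySem.List.pyGetD (l.map (fun c => pvLast c)) (a : Int) ' ' = pvLast (l.getD a "") := by
  rw [PySem.List.pyGetD_natCast]
  rw [List.getD_eq_getElem _ _ (by simpa using ha), List.getD_eq_getElem _ _ ha]
  simp

lemma sum_vals (l : List String) : (pvValsOf l).sum = (l.map pvVal).sum := by
  unfold pvValsOf
  rw [List.map_map]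
  rfl

lemma keptB_eq (l : List String) (a b : Nat) (hab : a < b) (hb : b < l.length) :
    keptB l ((a : Int), (b : Int)) = (keepL l a b).map pvLast := by
  unfold keptB
  rw [map_val_keepL l a b hab hb]
  have h1 : PySem.List.slice (l.map (fun c => pvLast c)) none (some ((a : Int)))
      = (l.map (fun c => pvLast c)).take a := PySem.List.slice_to_natCast ..
  have hc1 : ((a : Int) + 1) = ((a + 1 : Nat) : Int) := by push_cast; ring
  have hc2 : ((b : Int) + 1) = ((b + 1 : Nat) : Int) := by push_cast; ring
  have h2 : PySem.List.slice (l.map (fun c => pvLast c)) (some ((a : Int) + 1)) (some ((b : Int)))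
      = ((l.map (fun c => pvLast c)).drop (a + 1)).take (b - (a + 1)) := by
    rw [hc1, PySem.List.slice_natCast]
  have h3 : PySem.List.slice (l.map (fun c => pvLast c)) (some ((b : Int) + 1)) none
      = (l.map (fun c => pvLast c)).drop (b + 1) := by
    rw [hc2, PySem.List.slice_from_natCast]
  rw [h1, h2, h3, List.append_assoc]

lemma condB_eq (l : List String) (a b : Nat) (hab : a < b) (hb : b < l.length) :
    condB l ((a : Int), (b : Int)) = condP l a b := by
  unfold condB condP
  rw [keptB_eq l a b hab hb, getD_vals l a (lt_trans hab hb), getD_vals l b hb, sum_vals,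
    gn_eq, sum_val_keepL l a b hab hb]

lemma dB_eq (l : List String) (a b : Nat) (hab : a < b) (hb : b < l.length) :
    dB l ((a : Int), (b : Int)) = dPair l a b := by
  unfold dB dPair
  rw [getD_vals l a (lt_trans hab hb), getD_vals l b hb]

lemma prB_eq (l : List String) (a b : Nat) (hab : a < b) (hb : b < l.length) :
    prB l ((a : Int), (b : Int)) = prPair l a b := by
  unfold prB prPair
  rw [getD_ranks l a (lt_trans hab hb), getD_ranks l b hb]

lemma pairRankEq_entry (l : List String) (a b : Nat) :
    pvPairRankEq (keepL l a b, [l.getD a "", l.getD b ""]) = prPair l a b := by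
  unfold pvPairRankEq prPair
  simp [PySem.List.pyGetD]

-- B's loop state, as a filtered fold over the index pairs
def stB (l : List String) : Bool × Int × Bool × Bool :=
  ((pairsOf (PySem.List.len l)).filter (condB l)).foldl (updB l) (false, -1, false, false)

lemma alt_eq (l : List String) :
    best_arrangement_alt l =
      (let ranks := l.map (fun c => pvLast c)
       let best : Option String :=
         if 2 ≤ PySem.List.len l then
           if (stB l).1 then
             some (if (stB l).2.2.2 then "ngau-pair"
                   else if (stB l).2.2.1 then "ngau-ngau"
                   else "ngau-" ++ PySem.Int.toStr (stB l).2.1)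
           else none
         else none
       let best := if ranks.all (fun r => r ∈ (['1','2','3','4'] : List Char)) then some "all-small" else best
       let best := if ranks.all (fun r => r ∈ (['0','J','Q','K'] : List Char)) then some "all-big" else best
       best.getD "no-game") := by
  unfold best_arrangement_alt stB
  simp only []
  have hfold :
      (PySem.List.pyRange 0 (PySem.List.len l) 1).foldl (fun st i =>
        (PySem.List.pyRange (i + 1) (PySem.List.len l) 1).foldl (fun st j =>
          let kept := PySem.List.slice (l.map (fun c => pvLast c)) none (some i)
                    ++ PySem.List.slice (l.map (fun c => pvLast c)) (some (i + 1)) (some j)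
                    ++ PySem.List.slice (l.map (fun c => pvLast c)) (some (j + 1)) none
          if PySem.Int.mod (((l.map (fun c => pvLast c)).map pvValB).sum
                - PySem.List.pyGetD ((l.map (fun c => pvLast c)).map pvValB) i 0
                - PySem.List.pyGetD ((l.map (fun c => pvLast c)).map pvValB) j 0) 10 == 0
             || (PySem.Set.ofList kept).length == 1 then
            let d := PySem.Int.mod (PySem.List.pyGetD ((l.map (fun c => pvLast c)).map pvValB) i 0
                + PySem.List.pyGetD ((l.map (fun c => pvLast c)).map pvValB) j 0) 10
            (true, max st.2.1 d, st.2.2.1 || (d == 0),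
             st.2.2.2 || (PySem.List.pyGetD (l.map (fun c => pvLast c)) i ' '
               == PySem.List.pyGetD (l.map (fun c => pvLast c)) j ' '))
          else st) st)
        ((false, -1, false, false) : Bool × Int × Bool × Bool)
      = ((pairsOf (PySem.List.len l)).filter (condB l)).foldl (updB l) (false, -1, false, false) := by
    rw [foldl_foldl_pairs]
    rw [PySem.List.foldl_congr_mem _ _
      (fun st p => if condB l p = true then updB l st p else st) _ ?_]
    · exact PySem.List.foldl_if_eq_foldl_filter _ _ _ _
    · intro acc p _
      show (if condB l p = true then updB l acc p else acc)
        = (fun st p => if condB l p = true then updB l st p else st) acc p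
      rfl
  rw [hfold]

lemma dPair_nonneg (l : List String) (a b : Nat) : 0 ≤ dPair l a b :=
  PySem.Int.mod_nonneg _ (by norm_num)

lemma main_equiv (cards : List String) (hnd : cards.Nodup) :
    best_arrangement cards = best_arrangement_alt cards := by
  rw [alt_eq]
  unfold best_arrangement
  simp only []
  set L := cards.length with hL
  have hlen : PySem.List.len cards = (L : Int) := by simp [pysem]; omega
  set G := (pairsOf (PySem.List.len cards)).filter (condB cards) with hG
  have hstB : stB cards = G.foldl (updB cards) (false, -1, false, false) := by rw [hG]; rfl
  obtain ⟨hst1, hstz, hstp, hstm⟩ := foldB_char cards G (false, -1, false, false)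
  rw [← hstB] at hst1 hstz hstp hstm
  have hGmem : ∀ p, p ∈ G ↔ ∃ a b : Nat, a < b ∧ b < L ∧ condP cards a b = true
      ∧ p = ((a : Int), (b : Int)) := by
    intro p
    rw [hG, List.mem_filter, mem_pairsOf]
    constructor
    · rintro ⟨⟨a, b, hab, hbm, rfl⟩, hc⟩
      have hb : b < L := by rw [hlen] at hbm; exact_mod_cast hbm
      exact ⟨a, b, hab, hb, by rw [← condB_eq cards a b hab hb]; exact hc, rfl⟩
    · rintro ⟨a, b, hab, hb, hc, rfl⟩
      refine ⟨⟨a, b, hab, by rw [hlen]; exact_mod_cast hb, rfl⟩, ?_⟩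
      rw [condB_eq cards a b hab hb]; exact hc
  congr 1
  congr 1
  congr 1
  by_cases hH : HasPair cards
  · -- some good pair exists
    obtain ⟨a0, b0, hab0, hb0, hc0⟩ := hH
    have hform : ¬ (arrange cards = []) := by
      rw [arrange_eq_nil_iff]
      intro hno; exact hno ⟨a0, b0, hab0, hb0, hc0⟩
    have hGne : ¬ (G = []) := by
      intro h
      have := (hGmem ((a0 : Int), (b0 : Int))).mpr ⟨a0, b0, hab0, hb0, hc0, rfl⟩
      simp [h] at this
    have hm2 : 2 ≤ PySem.List.len cards := by
      rw [hlen]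
      have h2 : 2 ≤ L := by omega
      exact_mod_cast h2
    have hst1' : (stB cards).1 = true := by
      rw [hst1, Bool.false_or, Bool.not_eq_eq_eq_not]
      simp [hGne]
    rw [if_pos hm2, if_pos hst1', if_pos hform]
    rw [checkPair_eq]
    have hpairEq : (arrange cards).any pvPairRankEq = (stB cards).2.2.2 := by
      rw [hstp, Bool.false_or, Bool.eq_iff_iff]
      simp only [List.any_eq_true]
      constructor
      · rintro ⟨f, hf, hpf⟩
        rw [arrange_mem cards hnd] at hf
        obtain ⟨a, b, hab, hb, hc, rfl⟩ := hf
        refine ⟨((a : Int), (b : Int)), (hGmem _).mpr ⟨a, b, hab, hb, hc, rfl⟩, ?_⟩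
        rw [prB_eq cards a b hab hb, ← pairRankEq_entry cards a b]
        exact hpf
      · rintro ⟨p, hp, hpp⟩
        obtain ⟨a, b, hab, hb, hc, rfl⟩ := (hGmem p).mp hp
        refine ⟨(keepL cards a b, [cards.getD a "", cards.getD b ""]),
          (arrange_mem cards hnd _).mpr ⟨a, b, hab, hb, hc, rfl⟩, ?_⟩
        rw [pairRankEq_entry cards a b, ← prB_eq cards a b hab hb]
        exact hpp
    have hzeroEq : ((arrange cards).map (fun f => get_numeric f.2)).all (fun d => d != 0)
        = !(stB cards).2.2.1 := by
      rw [hstz, Bool.false_or]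
      cases hany : G.any (fun p => dB cards p == 0) with
      | true =>
        rw [List.any_eq_true] at hany
        obtain ⟨p, hp, hdp⟩ := hany
        obtain ⟨a, b, hab, hb, hc, rfl⟩ := (hGmem p).mp hp
        rw [dB_eq cards a b hab hb] at hdp
        simp only [Bool.not_true, List.all_eq_false]
        refine ⟨dPair cards a b, ?_, by simp only [bne, hdp, Bool.not_true]; exact Bool.false_ne_true⟩
        rw [List.mem_map]
        refine ⟨(keepL cards a b, [cards.getD a "", cards.getD b ""]),
          (arrange_mem cards hnd _).mpr ⟨a, b, hab, hb, hc, rfl⟩, ?_⟩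
        exact gn_pair _ _
      | false =>
        rw [List.any_eq_false] at hany
        simp only [Bool.not_false, List.all_eq_true]
        rintro x hx
        rw [List.mem_map] at hx
        obtain ⟨f, hf, rfl⟩ := hx
        rw [arrange_mem cards hnd] at hf
        obtain ⟨a, b, hab, hb, hc, rfl⟩ := hf
        have hfa := hany ((a : Int), (b : Int)) ((hGmem _).mpr ⟨a, b, hab, hb, hc, rfl⟩)
        rw [dB_eq cards a b hab hb] at hfa
        show ((get_numeric [cards.getD a "", cards.getD b ""]) != 0) = true
        rw [gn_pair]
        show ((dPair cards a b) != 0) = true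
        simp only [bne, hfa, Bool.not_false]
    have hmaxEq : (PySem.List.max? ((arrange cards).map (fun f => get_numeric f.2))
        (fun x => x)).getD 0 = (stB cards).2.1 := by
      rw [hstm]
      have hdig : ((arrange cards).map (fun f => get_numeric f.2)) ≠ [] := by
        simpa using hform
      obtain ⟨v, hv⟩ : ∃ v, PySem.List.max? ((arrange cards).map (fun f => get_numeric f.2))
          (fun x => x) = some v := by
        cases hmx : PySem.List.max? ((arrange cards).map (fun f => get_numeric f.2))
            (fun x => x) with
        | none => rw [PySem.List.max?_eq_none_iff] at hmx; exact absurd hmx hdig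
        | some v => exact ⟨v, rfl⟩
      rw [hv, Option.getD_some]
      -- v is a digit of a good pair; maxB is the fold max
      have hmemdig : ∀ x, x ∈ (arrange cards).map (fun f => get_numeric f.2)
          ↔ ∃ a b : Nat, a < b ∧ b < L ∧ condP cards a b = true ∧ x = dPair cards a b := by
        intro x
        rw [List.mem_map]
        constructor
        · rintro ⟨f, hf, rfl⟩
          rw [arrange_mem cards hnd] at hf
          obtain ⟨a, b, hab, hb, hc, rfl⟩ := hf
          exact ⟨a, b, hab, hb, hc, gn_pair _ _⟩
        · rintro ⟨a, b, hab, hb, hc, rfl⟩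
          exact ⟨(keepL cards a b, [cards.getD a "", cards.getD b ""]),
            (arrange_mem cards hnd _).mpr ⟨a, b, hab, hb, hc, rfl⟩, gn_pair _ _⟩
      have hmemG : ∀ x, x ∈ G.map (dB cards)
          ↔ ∃ a b : Nat, a < b ∧ b < L ∧ condP cards a b = true ∧ x = dPair cards a b := by
        intro x
        rw [List.mem_map]
        constructor
        · rintro ⟨p, hp, rfl⟩
          obtain ⟨a, b, hab, hb, hc, rfl⟩ := (hGmem p).mp hp
          exact ⟨a, b, hab, hb, hc, by rw [dB_eq cards a b hab hb]⟩
        · rintro ⟨a, b, hab, hb, hc, rfl⟩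
          exact ⟨((a : Int), (b : Int)), (hGmem _).mpr ⟨a, b, hab, hb, hc, rfl⟩,
            dB_eq cards a b hab hb⟩
      apply le_antisymm
      · -- v ≤ foldl max
        have hvmem := PySem.List.max?_mem hv
        rw [hmemdig] at hvmem
        have : v ∈ G.map (dB cards) := (hmemG v).mpr hvmem
        exact (PySem.List.le_foldl_max _ _).2 v this
      · rcases PySem.List.foldl_max_mem (G.map (dB cards)) (-1) with hm | hm
        · exfalso
          have h0 : dPair cards a0 b0 ∈ G.map (dB cards) :=
            (hmemG _).mpr ⟨a0, b0, hab0, hb0, hc0, rfl⟩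
          have hle := (PySem.List.le_foldl_max (G.map (dB cards)) (-1)).2 _ h0
          rw [hm] at hle
          have := dPair_nonneg cards a0 b0
          omega
        · rw [hmemG] at hm
          have : (G.map (dB cards)).foldl max (-1)
              ∈ (arrange cards).map (fun f => get_numeric f.2) := (hmemdig _).mpr hm
          exact PySem.List.max?_isMax hv _ this
    rw [hpairEq, hzeroEq, hmaxEq]
    cases hp : (stB cards).2.2.2
    · simp only [if_false, Bool.false_eq_true]
      cases hz : (stB cards).2.2.1 <;> simp
    · simp
  · -- no good pair: both sides are none
    have hform : arrange cards = [] := by rw [arrange_eq_nil_iff]; exact hH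
    have hGe : G = [] := by
      rw [List.eq_nil_iff_forall_not_mem]
      intro p hp
      obtain ⟨a, b, hab, hb, hc, -⟩ := (hGmem p).mp hp
      exact hH ⟨a, b, hab, hb, hc⟩
    have hst1' : (stB cards).1 = false := by
      rw [hst1, Bool.false_or, hGe]
      rfl
    rw [if_neg (by simp [hform]), hst1']
    by_cases hm : 2 ≤ PySem.List.len cards
    · rw [if_pos hm]
      simp
    · rw [if_neg hm]

-- ===== VERDICT (by name: the statement is the Claim_ definition above) =====
theorem best_arrangement_spec : Claim_equal_best_arrangement := by
  intro cards _ hpre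
  unfold Spec_best_arrangement
  exact main_equiv cards hpre.1
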